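-- pv_equiv track=rewrite | github.com/achobgood/wxops | src/wxcli/migration/transform/cucm_pattern.py | _convert_segment
-- ===== SOURCE A (Python) =====
-- _AT_MACRO_REGEX = "[0-9]{1,15}"
--
-- def _convert_segment(segment: str) -> str:
--     """Convert a CUCM pattern segment to regex."""
--     result = []
--     i = 0
--     while i < len(segment):
--         ch = segment[i]
--         if ch == "X":
--             result.append("[0-9]")
--         elif ch == "!":
--             result.append("[0-9]+")
--         elif ch == "@":
--             result.append(_AT_MACRO_REGEX)
--         elif ch == "+":
--             result.append("\\+")
--         elif ch == "[":
--             # Pass through bracket expressions (ranges and negation)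
--             try:
--                 end = segment.index("]", i)
--             except ValueError:
--                 raise ValueError(f"Unclosed bracket in CUCM pattern segment: {segment!r}")
--             result.append(segment[i : end + 1])
--             i = end
--         elif ch.isdigit():
--             result.append(ch)
--         # Skip any other character (shouldn't normally appear)
--         i += 1
--     return "".join(result)
-- ===== SOURCE B (Python) =====
-- import re
--
-- _AT_MACRO_REGEX = "[0-9]{1,15}"
--
-- _CHAR_MAP = {"X": "[0-9]", "!": "[0-9]+", "@": _AT_MACRO_REGEX, "+": "\\+"}
--
-- # One-pass tokenization: the regex grabs whole bracket expressions (up to the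
-- # first ']') or single characters; mapping each token then needs no index jumps.
-- _TOKEN = re.compile(r"\[[^\]]*\]|.", re.DOTALL)
--
-- def _convert_segment(segment: str) -> str:
--     parts = []
--     for m in _TOKEN.finditer(segment):
--         t = m.group()
--         if len(t) > 1:
--             parts.append(t)
--         elif t == "[":
--             raise ValueError(f"Unclosed bracket in CUCM pattern segment: {segment!r}")
--         elif t in _CHAR_MAP:
--             parts.append(_CHAR_MAP[t])
--         elif t.isdigit():
--             parts.append(t)
--     return "".join(parts)
-- ===== Notes on version B (the rewrite author's own statement) =====
-- stated objective: idiomatic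
-- what changed: Replaces A's manual index-driven while-loop with segment.index() jumps by a single regex tokenization pass (re.finditer of bracket-expression-or-any-char) followed by a per-token mapping via a dict; lone '[' tokens raise the same ValueError.
-- outside the precondition, e.g. on _convert_segment('['): A raises ValueError, B raises ValueError
import Mathlib
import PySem

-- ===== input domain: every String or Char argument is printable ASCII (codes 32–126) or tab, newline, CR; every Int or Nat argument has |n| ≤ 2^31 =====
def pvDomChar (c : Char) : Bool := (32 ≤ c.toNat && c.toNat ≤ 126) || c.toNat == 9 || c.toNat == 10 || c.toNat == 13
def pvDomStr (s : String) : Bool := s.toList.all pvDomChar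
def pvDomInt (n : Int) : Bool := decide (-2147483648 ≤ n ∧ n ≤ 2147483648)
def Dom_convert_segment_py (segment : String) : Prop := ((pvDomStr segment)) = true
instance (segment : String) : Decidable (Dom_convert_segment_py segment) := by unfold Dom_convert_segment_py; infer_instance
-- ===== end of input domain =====

-- B is a one-pass tokenize-then-map rewrite (idiomatic, regex-driven in Python); same return value as A wherever A returns.

-- ===== PORT A =====
-- A's while-loop over an index i with manual `segment.index("]", i)` jumps.
def loopA (s : List Char) (i : Nat) : List Char :=
  if h : i < s.length then
    let ch := s[i]
    if ch = 'X' then "[0-9]".toList ++ loopA s (i + 1)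
    else if ch = '!' then "[0-9]+".toList ++ loopA s (i + 1)
    else if ch = '@' then "[0-9]{1,15}".toList ++ loopA s (i + 1)
    else if ch = '+' then ['\\', '+'] ++ loopA s (i + 1)
    else if ch = '[' then
      -- segment.index("]", i): first ']' at or after i
      match (s.drop i).findIdx? (· = ']') with
      | none => []          -- raise ValueError (outside Pre_)
      | some j => (s.drop i).take (j + 1) ++ loopA s (i + j + 1)
    else if ch.isDigit then [ch] ++ loopA s (i + 1)  -- isDigit exact on the ASCII domain
    else loopA s (i + 1)
  else []
termination_by s.length - i
decreasing_by all_goals omega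

def convert_segment_py (segment : String) : String :=
  String.mk (loopA segment.toList 0)

-- ===== PORT B =====
-- Hand-transcription of the regex r"\[[^\]]*\]|."(DOTALL): at '[' with a later
-- ']' the token is the whole bracket expression (up to the FIRST ']'), else one char.
def tokenizeB (s : List Char) : List (List Char) :=
  match s with
  | [] => []
  | c :: rest =>
    if c = '[' then
      match rest.findIdx? (· = ']') with
      | some j => ('[' :: rest.take (j + 1)) :: tokenizeB (rest.drop (j + 1))
      | none => ['['] :: tokenizeB rest
    else [c] :: tokenizeB rest
termination_by s.length
decreasing_by all_goals simp

-- B's loop body: bracket tokens verbatim, lone '[' raises, map X/!/@/+, digits through, drop the rest.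
def tokExpand (t : List Char) : List Char :=
  match t with
  | [c] =>
    if c = '[' then []      -- raise ValueError (outside Pre_)
    else if c = 'X' then "[0-9]".toList
    else if c = '!' then "[0-9]+".toList
    else if c = '@' then "[0-9]{1,15}".toList
    else if c = '+' then ['\\', '+']
    else if c.isDigit then [c]
    else []
  | t => t                  -- len(t) > 1: bracket expression verbatim

def convert_segment_py_alt (segment : String) : String :=
  String.mk ((tokenizeB segment.toList).flatMap tokExpand)

-- ===== PRECONDITION & SPEC =====
-- Pre_ excludes exactly the inputs where A (and B) raise ValueError: a '[' with no ']' anywhere after it.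
def noUnclosed : List Char → Bool
  | [] => true
  | c :: rest => if c = '[' then (']' ∈ rest) && noUnclosed rest else noUnclosed rest

def Pre_convert_segment_py (segment : String) : Prop :=
  noUnclosed segment.toList = true

instance (segment : String) : Decidable (Pre_convert_segment_py segment) := by
  unfold Pre_convert_segment_py; infer_instance

def pvWitness_convert_segment_py : String := "9X![^2-4]+@"

def Spec_convert_segment_py (segment : String) (out : String) : Prop := out = convert_segment_py_alt segment
instance (segment : String) (out : String) : Decidable (Spec_convert_segment_py segment out) := by unfold Spec_convert_segment_py; infer_instance

-- ===== CLAIM (what is proved, stated in full; the proofs are below) =====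
def Claim_equal_convert_segment_py : Prop := ∀ (segment : String), Dom_convert_segment_py segment → Pre_convert_segment_py segment → Spec_convert_segment_py segment (convert_segment_py segment)

-- ===== LEMMAS AND PROOFS =====
theorem noUnclosed_tail {c : Char} {l : List Char} (h : noUnclosed (c :: l) = true) :
    noUnclosed l = true := by
  simp only [noUnclosed] at h
  split at h <;> simp_all

theorem noUnclosed_drop {l : List Char} (k : Nat) (h : noUnclosed l = true) :
    noUnclosed (l.drop k) = true := by
  induction k generalizing l with
  | zero => simpa using h
  | succ k ih =>
    cases l with
    | nil => simpa using h
    | cons c rest => exact ih (noUnclosed_tail h)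

theorem loopA_eq (s : List Char) :
    ∀ n i, s.length - i ≤ n → noUnclosed (s.drop i) = true →
      loopA s i = (tokenizeB (s.drop i)).flatMap tokExpand := by
  intro n
  induction n with
  | zero =>
    intro i hn _
    have hi : s.length ≤ i := by omega
    rw [loopA, dif_neg (by omega), List.drop_eq_nil_of_le hi]
    simp [tokenizeB]
  | succ n ih =>
    intro i hn hpre
    by_cases hi : i < s.length
    · have hdrop : s.drop i ≠ [] := by
        simp [List.drop_eq_nil_iff]; omega
      obtain ⟨c, rest, hcr⟩ := List.exists_cons_of_ne_nil hdrop
      have hrest : s.drop (i + 1) = rest := by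
        have := congrArg List.tail hcr
        simpa [List.tail_drop] using this
      have hc : s[i] = c := by
        have : (s.drop i)[0]'(by simp [hcr]) = c := by simp [hcr]
        simpa using this
      have hpre' : noUnclosed rest = true := noUnclosed_tail (hcr ▸ hpre)
      rw [loopA, dif_pos hi]
      simp only [hc]
      by_cases hX : c = 'X'
      · rw [if_pos hX, hcr, ih (i+1) (by omega) (hrest ▸ hpre')]
        rw [hrest, tokenizeB]
        simp [hX, tokExpand]
      rw [if_neg hX]
      by_cases hB1 : c = '!'
      · rw [if_pos hB1, hcr, ih (i+1) (by omega) (hrest ▸ hpre')]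
        rw [hrest, tokenizeB]
        simp [hB1, tokExpand]
      rw [if_neg hB1]
      by_cases hAt : c = '@'
      · rw [if_pos hAt, hcr, ih (i+1) (by omega) (hrest ▸ hpre')]
        rw [hrest, tokenizeB]
        simp [hAt, tokExpand]
      rw [if_neg hAt]
      by_cases hP : c = '+'
      · rw [if_pos hP, hcr, ih (i+1) (by omega) (hrest ▸ hpre')]
        rw [hrest, tokenizeB]
        simp [hP, tokExpand]
      rw [if_neg hP]
      by_cases hL : c = '['
      · rw [if_pos hL]
        -- Pre_ gives a ']' in rest, so both searches succeed.
        have hmem : ']' ∈ rest := by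
          have h2 := hcr ▸ hpre
          rw [hL] at h2
          simp [noUnclosed] at h2
          exact h2.1
        have hsome : (rest.findIdx? (· = ']')).isSome := by
          rw [List.findIdx?_isSome]
          exact List.any_of_mem hmem (by simp)
        obtain ⟨k, hk⟩ := Option.isSome_iff_exists.mp hsome
        have hk' : (s.drop i).findIdx? (· = ']') = some (k + 1) := by
          rw [hcr, List.findIdx?_cons]
          simp [hL, hk]
        simp only [hk']
        have hklt : k < rest.length := (List.findIdx?_eq_some_iff_findIdx_eq.mp hk).1
        obtain ⟨r0, rest', hre⟩ := List.exists_cons_of_ne_nil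
          (by intro h; rw [h] at hklt; simp at hklt : rest ≠ [])
        have hnext : s.drop (i + (k + 1) + 1) = rest.drop (k + 1) := by
          have h3 : List.drop (k + 2) (List.drop i s) = List.drop (i + (k + 2)) s :=
            List.drop_drop
          rw [show i + (k + 1) + 1 = i + (k + 2) by omega, ← h3, hcr]
          simp
        have hrec := ih (i + (k + 1) + 1) (by omega)
          (hnext ▸ noUnclosed_drop (k + 1) hpre')
        rw [hrec, hnext, hcr, tokenizeB]
        simp only [hL, reduceIte, hk]
        have htake : ('[' :: rest).take (k + 1 + 1) = '[' :: rest.take (k + 1) := by simp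
        rw [htake]
        rw [show ('[' :: rest.take (k + 1)) :: tokenizeB (rest.drop (k + 1)) =
          [('[' :: rest.take (k + 1))] ++ tokenizeB (rest.drop (k + 1)) by simp]
        rw [List.flatMap_append]
        congr 1
        rw [hre]
        simp [tokExpand]
      rw [if_neg hL]
      have hrec := ih (i+1) (by omega) (hrest ▸ hpre')
      by_cases hD : c.isDigit
      · rw [if_pos hD, hcr, hrec, hrest, tokenizeB]
        simp [hL, tokExpand, hX, hB1, hAt, hP, hD]
      · rw [if_neg hD, hcr, hrec, hrest, tokenizeB]
        simp [hL, tokExpand, hX, hB1, hAt, hP, hD]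
    · rw [loopA, dif_neg hi, List.drop_eq_nil_of_le (by omega)]
      simp [tokenizeB]

-- ===== VERDICT (by name: the statement is the Claim_ definition above) =====
theorem convert_segment_py_spec : Claim_equal_convert_segment_py := by
  intro segment _ hpre
  unfold Spec_convert_segment_py convert_segment_py convert_segment_py_alt
  rw [loopA_eq segment.toList segment.toList.length 0 (by omega) (by simpa using hpre)]
  simp
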